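-- pv_equiv track=rewrite | github.com/Yookaser/Algorithm_old | SWEA/D2/swea1979.py | word_position
-- ===== SOURCE A (Python) =====
-- def word_position(arr, word):
--     result = 0
--
--     for i in range(len(arr)):
--         row_cnt = 0 # 가로 확인
--         col_cnt = 0 # 세로 확인
--         for j in range(len(arr)):
--             if arr[i][j] == 0: # 가로로 확인할 때, 해당 값이 0인 경우
--                 if row_cnt == word: # 가로 확인이 M과 동일한 경우
--                     result += 1
--                 row_cnt = 0 # 초기화
--             elif arr[i][j] == 1: # 가로로 확인할 때, 해당 값이 1인 경우
--                 row_cnt += 1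
--                 if row_cnt == word and j == (len(arr) - 1): # 가로 확인이 M과 동일한데 마지막 요소인 경우
--                     result += 1
--
--             if arr[j][i] == 0:
--                 if col_cnt == word: # 세로로 확인할 때, 해당 값이 0인 경우
--                     if col_cnt == word: # 세로 확인이 M과 동일한 경우
--                         result += 1
--                 col_cnt = 0 # 초기화
--             elif arr[j][i] == 1: # 세로로 확인할 때, 해당 값이 1인 경우
--                 col_cnt += 1
--                 if col_cnt == word and j == (len(arr) - 1): # 세로 확인이 M과 동일한데 마지막 요소인 경우
--                     result += 1
--
--     return result
-- ===== SOURCE B (Python) =====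
-- def _count(line, word):
--     # recursive divide at the first zero: count 1s before it, recurse on the rest
--     if 0 in line:
--         k = line.index(0)
--         return (1 if line[:k].count(1) == word else 0) + _count(line[k + 1:], word)
--     if line and line[-1] == 1 and line.count(1) == word:
--         return 1
--     return 0
--
--
-- def word_position(arr, word):
--     n = len(arr)
--     rows = [row[:n] for row in arr]
--     cols = [[row[i] for row in rows] for i in range(n)]
--     return sum(_count(line, word) for line in rows + cols)
-- ===== Notes on version B (the rewrite author's own statement) =====
-- stated objective: simpler
-- what changed: B replaces A's stateful interleaved i/j double loop (threading result/row_cnt/col_cnt with per-cell last-index sentinel checks) by a stateless recursive per-line counter that splits each line at its first zero via index/slice, compares the 1-count of the prefix with word, and recurses on the remainder; rows and columns are materialised once and summed over.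
import Mathlib
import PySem

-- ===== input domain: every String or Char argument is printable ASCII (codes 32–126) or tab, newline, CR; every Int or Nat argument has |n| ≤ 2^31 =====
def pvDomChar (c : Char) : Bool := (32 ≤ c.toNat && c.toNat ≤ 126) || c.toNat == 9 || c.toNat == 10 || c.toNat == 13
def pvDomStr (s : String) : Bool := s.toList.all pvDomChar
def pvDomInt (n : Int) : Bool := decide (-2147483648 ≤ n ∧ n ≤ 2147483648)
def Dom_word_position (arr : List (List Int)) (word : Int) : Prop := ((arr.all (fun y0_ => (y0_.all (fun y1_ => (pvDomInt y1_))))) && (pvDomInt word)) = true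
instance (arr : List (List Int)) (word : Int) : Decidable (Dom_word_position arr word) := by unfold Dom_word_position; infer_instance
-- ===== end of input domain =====

-- B replaces A's stateful interleaved i/j double loop by a stateless recursive per-line
-- counter that splits each line at its first zero (index + slice + count) and recurses
-- on the remainder; rows and columns are materialised once (objective: simpler).

-- ===== PORT A =====
-- the body of A's `if arr[i][j]==0 / elif arr[i][j]==1` block for the row direction
def rowStepA (word n : Int) (s : Int × Int) (v j : Int) : Int × Int :=
  if v = 0 then ((if s.2 = word then s.1 + 1 else s.1), 0)
  else if v = 1 then ((if s.2 + 1 = word ∧ j = n - 1 then s.1 + 1 else s.1), s.2 + 1)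
  else (s.1, s.2)

-- the column-direction block (A literally nests `if col_cnt == word` twice there)
def colStepA (word n : Int) (s : Int × Int) (v j : Int) : Int × Int :=
  if v = 0 then ((if s.2 = word then (if s.2 = word then s.1 + 1 else s.1) else s.1), 0)
  else if v = 1 then ((if s.2 + 1 = word ∧ j = n - 1 then s.1 + 1 else s.1), s.2 + 1)
  else (s.1, s.2)

def word_position (arr : List (List Int)) (word : Int) : Int :=
  let n : Int := (arr.length : Int)
  (PySem.List.pyRange 0 n 1).foldl
    (fun result i =>
      ((PySem.List.pyRange 0 n 1).foldl
        (fun (s : Int × Int × Int) j =>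
          let t := rowStepA word n (s.1, s.2.1) (PySem.List.pyGetD (PySem.List.pyGetD arr i []) j 0) j
          let u := colStepA word n (t.1, s.2.2) (PySem.List.pyGetD (PySem.List.pyGetD arr j []) i 0) j
          (u.1, t.2, u.2))
        (result, 0, 0)).1)
    0

-- ===== PORT B =====
-- _count from Source B: recursion splitting the line at its first zero
def countAlt (line : List Int) (word : Int) : Int :=
  match h : PySem.List.index? line 0 with
  | some k =>
      (if ((PySem.List.slice line none (some (k : Int))).count 1 : Int) = word then 1 else 0)
        + countAlt (PySem.List.slice line (some ((k : Int) + 1)) none) word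
  | none =>
      if line ≠ [] ∧ PySem.List.pyGetD line (-1) 0 = 1 ∧ (line.count 1 : Int) = word then 1 else 0
termination_by line.length
decreasing_by
  have hk := PySem.List.getElem_of_index?_eq_some h
  obtain ⟨hklt, -, -⟩ := hk
  have hsl : PySem.List.slice line (some ((k : Int) + 1)) none = line.drop (k + 1) := by
    have : ((k : Int) + 1) = ((k + 1 : Nat) : Int) := by push_cast; ring
    rw [this, PySem.List.slice_from_natCast]
  rw [hsl]
  simp only [List.length_drop]
  omega

def word_position_alt (arr : List (List Int)) (word : Int) : Int :=
  let n : Int := (arr.length : Int)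
  let rows := arr.map (fun row => PySem.List.slice row none (some n))
  let cols := (PySem.List.pyRange 0 n 1).map (fun i =>
    rows.map (fun row => PySem.List.pyGetD row i 0))
  ((rows ++ cols).map (fun line => countAlt line word)).foldl (· + ·) 0

-- ===== PRECONDITION & SPEC =====
-- Pre_ is exactly where the Python A returns: A indexes arr[i][j] and arr[j][i] for all
-- i,j < len(arr), so it raises IndexError iff some row is shorter than len(arr).
def Pre_word_position (arr : List (List Int)) (word : Int) : Prop :=
  ∀ row ∈ arr, arr.length ≤ row.length
instance (arr : List (List Int)) (word : Int) : Decidable (Pre_word_position arr word) := by unfold Pre_word_position; infer_instance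

def pvWitness_word_position : List (List Int) × Int := ([[1, 0], [1, 1]], 2)

def Spec_word_position (arr : List (List Int)) (word : Int) (out : Int) : Prop := out = word_position_alt arr word
instance (arr : List (List Int)) (word : Int) (out : Int) : Decidable (Spec_word_position arr word out) := by unfold Spec_word_position; infer_instance

-- ===== CLAIM (what is proved, stated in full; the proofs are below) =====
def Claim_equal_word_position : Prop := ∀ (arr : List (List Int)) (word : Int), Dom_word_position arr word → Pre_word_position arr word → Spec_word_position arr word (word_position arr word)

-- ===== LEMMAS AND PROOFS =====

-- run the per-cell step of A over a value list carrying the running index explicitly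
def foldWith (S : (Int × Int) → Int → Int → (Int × Int)) : List Int → Int → (Int × Int) → (Int × Int)
  | [], _, s => s
  | v :: t, a, s => foldWith S t (a + 1) (S s v a)

-- one step of a plain run-length scan (proof-side abstraction of A's inner step)
def lineStepB (word : Int) (s : Int × Int) (v : Int) : Int × Int :=
  if v = 0 then ((if s.2 = word then s.1 + 1 else s.1), 0)
  else if v = 1 then (s.1, s.2 + 1)
  else (s.1, s.2)

-- canonical per-line count: run-length scan plus end-of-line adjustment
def finishB (word : Int) (L : List Int) (s : Int × Int) : Int × Int :=
  let t := L.foldl (lineStepB word) s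
  if L.getLast?.getD 0 = 1 ∧ t.2 = word then (t.1 + 1, t.2) else t

lemma colStepA_eq_rowStepA (word n : Int) : colStepA word n = rowStepA word n := by
  funext s v j
  unfold colStepA rowStepA
  split_ifs <;> rfl

lemma rowStepA_shift (word n : Int) (r c v j : Int) :
    rowStepA word n (r, c) v j =
      (r + (rowStepA word n (0, c) v j).1, (rowStepA word n (0, c) v j).2) := by
  unfold rowStepA
  split_ifs <;> simp <;> ring

lemma lineStepB_shift (word : Int) (r c v : Int) :
    lineStepB word (r, c) v =
      (r + (lineStepB word (0, c) v).1, (lineStepB word (0, c) v).2) := by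
  unfold lineStepB
  split_ifs <;> simp <;> ring

lemma foldl_shift (S : (Int × Int) → Int → (Int × Int))
    (hS : ∀ r c j, S (r, c) j = (r + (S (0, c) j).1, (S (0, c) j).2)) :
    ∀ (js : List Int) (r c : Int),
      js.foldl S (r, c) = (r + (js.foldl S (0, c)).1, (js.foldl S (0, c)).2) := by
  intro js
  induction js with
  | nil => intro r c; simp
  | cons j t ih =>
    intro r c
    simp only [List.foldl_cons]
    rw [hS r c j, ih, ih (S (0, c) j).1 (S (0, c) j).2]
    ring_nf

lemma split_inner (word n : Int) (SR SC : (Int × Int) → Int → (Int × Int))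
    (hR : ∀ r c j, SR (r, c) j = (r + (SR (0, c) j).1, (SR (0, c) j).2))
    (hC : ∀ r c j, SC (r, c) j = (r + (SC (0, c) j).1, (SC (0, c) j).2)) :
    ∀ (js : List Int) (res rc cc : Int),
      js.foldl (fun (s : Int × Int × Int) j =>
          let t := SR (s.1, s.2.1) j
          let u := SC (t.1, s.2.2) j
          (u.1, t.2, u.2)) (res, rc, cc)
      = (res + (js.foldl SR (0, rc)).1 + (js.foldl SC (0, cc)).1,
         (js.foldl SR (0, rc)).2, (js.foldl SC (0, cc)).2) := by
  intro js
  induction js with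
  | nil => intro res rc cc; simp
  | cons j t ih =>
    intro res rc cc
    simp only [List.foldl_cons]
    rw [hR res rc j]
    rw [hC (res + (SR (0, rc) j).1) cc j]
    rw [ih]
    rw [foldl_shift SR hR t (SR (0, rc) j).1 (SR (0, rc) j).2,
        foldl_shift SC hC t (SC (0, cc) j).1 (SC (0, cc) j).2]
    ring_nf

lemma bridge_foldWith (S : (Int × Int) → Int → Int → (Int × Int)) (f : Int → Int) :
    ∀ (k : Nat) (a : Int) (s : Int × Int),
      (PySem.List.pyRange a (a + k) 1).foldl (fun s j => S s (f j) j) s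
        = foldWith S ((PySem.List.pyRange a (a + k) 1).map f) a s := by
  intro k
  induction k with
  | zero => intro a s; simp [PySem.List.pyRange_one_eq_nil, foldWith]
  | succ m ih =>
    intro a s
    rw [PySem.List.pyRange_one_cons (by omega)]
    have h1 : a + 1 + (m : Int) = a + ((m : Nat) + 1 : Nat) := by push_cast; ring
    simp only [List.foldl_cons, List.map_cons, foldWith]
    rw [← h1, ih (a + 1) (S s (f a) a)]

lemma getLast?_cons_ne (v : Int) (t : List Int) (h : t ≠ []) :
    (v :: t).getLast? = t.getLast? := by
  rw [List.getLast?_cons, List.getLast?_eq_getLast_of_ne_nil h]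
  rfl

lemma endScan (word n : Int) :
    ∀ (L : List Int) (a : Int) (s : Int × Int), a + (L.length : Int) = n →
      foldWith (fun s v j => rowStepA word n s v j) L a s = finishB word L s := by
  intro L
  induction L with
  | nil =>
    intro a s _
    simp [foldWith, finishB]
  | cons v t ih =>
    intro a s h
    rcases eq_or_ne t [] with ht | ht
    · subst ht
      simp only [List.length_cons, List.length_nil] at h
      have ha : a = n - 1 := by omega
      subst ha
      unfold foldWith foldWith finishB rowStepA lineStepB
      rcases s with ⟨r, c⟩
      by_cases h0 : v = 0
      · subst h0; simp
      · by_cases h1 : v = 1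
        · subst h1
          simp only [List.foldl_cons, List.foldl_nil, List.getLast?_singleton,
            Option.getD_some]
          norm_num
          split_ifs with hc1 hc2 hc3 <;> first | rfl | omega | simp_all | exact absurd hc1.1 (by omega)
        · simp [h0, h1, List.getLast?_singleton]
    · have hlen : a + 1 + (t.length : Int) = n := by
        simp only [List.length_cons] at h; push_cast at h ⊢; omega
      have hane : a ≠ n - 1 := by
        have : (1 : Int) ≤ (t.length : Int) := by
          have := List.length_pos_iff.mpr ht; exact_mod_cast this
        omega
      have hstep : rowStepA word n s v a = lineStepB word s v := by
        unfold rowStepA lineStepB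
        split_ifs with hc1 hc2 hc3 <;> first
          | rfl
          | (exact absurd hc2.2 hane)
          | (exact absurd ⟨hc2, rfl⟩ (by simp [hc3]))
          | (simp_all)
      show foldWith _ t (a + 1) (rowStepA word n s v a) = finishB word (v :: t) s
      rw [hstep, ih (a + 1) (lineStepB word s v) hlen]
      unfold finishB
      rw [getLast?_cons_ne v t ht]
      simp [List.foldl_cons]

-- a zero-free list only accumulates its 1-count
lemma foldl_lineStepB_no_zero (word : Int) :
    ∀ (l : List Int), (0 : Int) ∉ l → ∀ a c : Int,
      l.foldl (lineStepB word) (a, c) = (a, c + (l.count 1 : Int)) := by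
  intro l
  induction l with
  | nil => intro _ a c; simp
  | cons v t ih =>
    intro hmem a c
    have hv0 : v ≠ 0 := fun hv => hmem (by simp [hv])
    have ht : (0 : Int) ∉ t := fun h => hmem (List.mem_cons_of_mem _ h)
    simp only [List.foldl_cons]
    have hstep : lineStepB word (a, c) v = (a, c + (if v = 1 then 1 else 0)) := by
      unfold lineStepB
      split_ifs <;> simp_all
    rw [hstep, ih ht, List.count_cons]
    by_cases hv1 : v = 1 <;> simp [hv1] <;> push_cast <;> ring

-- peeling a zero-free prefix and its terminating zero off a finishB count
lemma finishB_decomp (word : Int) (pre suf : List Int) (hpre : (0 : Int) ∉ pre) :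
    (finishB word (pre ++ 0 :: suf) (0, 0)).1
      = (if (pre.count 1 : Int) = word then 1 else 0) + (finishB word suf (0, 0)).1 := by
  have hfold : (pre ++ 0 :: suf).foldl (lineStepB word) (0, 0)
      = suf.foldl (lineStepB word) ((if (pre.count 1 : Int) = word then 1 else 0), 0) := by
    rw [List.foldl_append, foldl_lineStepB_no_zero word pre hpre 0 0, List.foldl_cons]
    unfold lineStepB
    simp
  rcases eq_or_ne suf [] with hs | hs
  · subst hs
    unfold finishB
    rw [hfold]
    simp [List.getLast?_append]
  · have hlast : (pre ++ 0 :: suf).getLast? = suf.getLast? := by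
      rw [List.getLast?_append, getLast?_cons_ne 0 suf hs,
          List.getLast?_eq_getLast_of_ne_nil hs]
      simp
    unfold finishB
    rw [hfold, hlast,
        foldl_shift (lineStepB word) (fun r c v => lineStepB_shift word r c v) suf _ 0]
    by_cases hq : suf.getLast?.getD 0 = 1 ∧ (List.foldl (lineStepB word) (0, 0) suf).2 = word <;>
      simp [hq] <;> split_ifs <;> ring

-- B's recursive counter computes the canonical per-line count
lemma countAlt_eq_finishB (word : Int) :
    ∀ (N : Nat) (line : List Int), line.length ≤ N →
      countAlt line word = (finishB word line (0, 0)).1 := by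
  intro N
  induction N with
  | zero =>
    intro line hlen
    have : line = [] := List.eq_nil_of_length_eq_zero (by omega)
    subst this
    rw [countAlt]
    simp [PySem.List.index?, finishB]
  | succ N ih =>
    intro line hlen
    rw [countAlt]
    split
    case _ k h =>
      obtain ⟨pre, suf, hline, hklen, hpre0⟩ := (PySem.List.index?_eq_some_iff line 0 k).mp h
      have htake : PySem.List.slice line none (some (k : Int)) = pre := by
        rw [PySem.List.slice_to_natCast, hline, ← hklen, List.take_left]
      have hdrop : PySem.List.slice line (some ((k : Int) + 1)) none = suf := by
        have hc : ((k : Int) + 1) = ((k + 1 : Nat) : Int) := by push_cast; ring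
        rw [hc, PySem.List.slice_from_natCast, hline]
        rw [show pre ++ 0 :: suf = (pre ++ [0]) ++ suf by simp,
            show k + 1 = (pre ++ [0]).length by simp [hklen], List.drop_left]
      have hsuflen : suf.length ≤ N := by
        have hl : line.length = pre.length + 1 + suf.length := by
          simp [hline]; omega
        omega
      rw [htake, hdrop, ih suf hsuflen, hline, finishB_decomp word pre suf hpre0]
    case _ h =>
      have hnm : (0 : Int) ∉ line := (PySem.List.index?_eq_none_iff line 0).mp h
      unfold finishB
      rw [foldl_lineStepB_no_zero word line hnm 0 0]
      rcases eq_or_ne line [] with hl | hl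
      · subst hl; simp
      · rw [PySem.List.pyGetD_neg_one line 0 hl, List.getLast?_eq_getLast_of_ne_nil hl]
        simp only [hl, ne_eq, not_false_iff, true_and, Option.getD_some, zero_add]
        split_ifs <;> rfl

-- A's row-i (resp. column-i) values as A reads them
def rowVals (arr : List (List Int)) (i : Int) : List Int :=
  (PySem.List.pyRange 0 (arr.length : Int) 1).map
    (fun j => PySem.List.pyGetD (PySem.List.pyGetD arr i []) j 0)

def colVals (arr : List (List Int)) (i : Int) : List Int :=
  (PySem.List.pyRange 0 (arr.length : Int) 1).map
    (fun j => PySem.List.pyGetD (PySem.List.pyGetD arr j []) i 0)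

lemma inner_eq (arr : List (List Int)) (word : Int) (i res : Int) :
    ((PySem.List.pyRange 0 (arr.length : Int) 1).foldl
        (fun (s : Int × Int × Int) j =>
          let t := rowStepA word (arr.length : Int) (s.1, s.2.1)
                     (PySem.List.pyGetD (PySem.List.pyGetD arr i []) j 0) j
          let u := colStepA word (arr.length : Int) (t.1, s.2.2)
                     (PySem.List.pyGetD (PySem.List.pyGetD arr j []) i 0) j
          (u.1, t.2, u.2))
        (res, 0, 0)).1
      = res + ((finishB word (rowVals arr i) (0, 0)).1 + (finishB word (colVals arr i) (0, 0)).1) := by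
  rw [colStepA_eq_rowStepA]
  have hsplit := split_inner word (arr.length : Int)
      (fun s j => rowStepA word (arr.length : Int) s
        (PySem.List.pyGetD (PySem.List.pyGetD arr i []) j 0) j)
      (fun s j => rowStepA word (arr.length : Int) s
        (PySem.List.pyGetD (PySem.List.pyGetD arr j []) i 0) j)
      (fun r c j => rowStepA_shift word (arr.length : Int) r c _ j)
      (fun r c j => rowStepA_shift word (arr.length : Int) r c _ j)
      (PySem.List.pyRange 0 (arr.length : Int) 1) res 0 0
  rw [hsplit]
  have hb0 : (0 : Int) + (arr.length : Int) = (arr.length : Int) := by ring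
  have hR := bridge_foldWith
      (fun s v j => rowStepA word (arr.length : Int) s v j)
      (fun j => PySem.List.pyGetD (PySem.List.pyGetD arr i []) j 0)
      arr.length 0 (0, 0)
  have hC := bridge_foldWith
      (fun s v j => rowStepA word (arr.length : Int) s v j)
      (fun j => PySem.List.pyGetD (PySem.List.pyGetD arr j []) i 0)
      arr.length 0 (0, 0)
  rw [hb0] at hR hC
  rw [hR, hC]
  have hlenR : (0 : Int) + (((PySem.List.pyRange 0 (arr.length : Int) 1).map
      (fun j => PySem.List.pyGetD (PySem.List.pyGetD arr i []) j 0)).length : Int)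
      = (arr.length : Int) := by
    simp [PySem.List.length_pyRange_one]
  have hlenC : (0 : Int) + (((PySem.List.pyRange 0 (arr.length : Int) 1).map
      (fun j => PySem.List.pyGetD (PySem.List.pyGetD arr j []) i 0)).length : Int)
      = (arr.length : Int) := by
    simp [PySem.List.length_pyRange_one]
  rw [endScan word (arr.length : Int) _ 0 (0, 0) hlenR,
      endScan word (arr.length : Int) _ 0 (0, 0) hlenC]
  unfold rowVals colVals
  ring

lemma map_pyGetD_take (row : List Int) (m : Nat) (h : m ≤ row.length) :
    (PySem.List.pyRange 0 (m : Int) 1).map (fun j => PySem.List.pyGetD row j 0)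
      = row.take m := by
  apply List.ext_getElem
  · simp [PySem.List.length_pyRange_one]; omega
  · intro k h1 h2
    rw [List.getElem_map, PySem.List.getElem_pyRange_one]
    have hk : k < m := by
      simpa [PySem.List.length_pyRange_one] using h1
    have h0k : (0 : Int) + (k : Int) = ((k : Nat) : Int) := by ring
    rw [h0k, PySem.List.pyGetD_natCast]
    rw [List.getD_eq_getElem row 0 (by omega), List.getElem_take]

lemma rowVals_take (arr : List (List Int)) (hpre : ∀ row ∈ arr, arr.length ≤ row.length)
    (k : Nat) (hk : k < arr.length) :
    rowVals arr (k : Int) = (arr[k]'hk).take arr.length := by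
  unfold rowVals
  rw [show PySem.List.pyGetD arr ((k : Nat) : Int) [] = arr.getD k [] from
      PySem.List.pyGetD_natCast arr k []]
  rw [List.getD_eq_getElem arr [] hk]
  exact map_pyGetD_take _ _ (hpre _ (List.getElem_mem hk))

lemma grid_eq (arr : List (List Int)) (hpre : ∀ row ∈ arr, arr.length ≤ row.length) :
    arr.map (fun row => PySem.List.slice row none (some (arr.length : Int)))
      = (PySem.List.pyRange 0 (arr.length : Int) 1).map (fun i => rowVals arr i) := by
  apply List.ext_getElem
  · simp [PySem.List.length_pyRange_one]
  · intro k h1 h2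
    have hk : k < arr.length := by simpa using h1
    rw [List.getElem_map, List.getElem_map, PySem.List.getElem_pyRange_one]
    rw [PySem.List.slice_to_natCast]
    have h0k : (0 : Int) + (k : Int) = ((k : Nat) : Int) := by ring
    rw [h0k, rowVals_take arr hpre k hk]

lemma cols_eq (arr : List (List Int)) (hpre : ∀ row ∈ arr, arr.length ≤ row.length) :
    (PySem.List.pyRange 0 (arr.length : Int) 1).map (fun i =>
        (arr.map (fun row => PySem.List.slice row none (some (arr.length : Int)))).map
          (fun row => PySem.List.pyGetD row i 0))
      = (PySem.List.pyRange 0 (arr.length : Int) 1).map (fun i => colVals arr i) := by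
  apply List.map_congr_left
  intro i hi
  rw [PySem.List.mem_pyRange_one] at hi
  unfold colVals
  apply List.ext_getElem
  · simp [PySem.List.length_pyRange_one]
  · intro k h1 h2
    have hk : k < arr.length := by simpa using h1
    rw [List.getElem_map, List.getElem_map, List.getElem_map, PySem.List.getElem_pyRange_one]
    have hrow : arr.length ≤ (arr[k]'hk).length := hpre _ (List.getElem_mem hk)
    rw [PySem.List.slice_to_natCast]
    have h0k : (0 : Int) + (k : Int) = ((k : Nat) : Int) := by ring
    rw [h0k]
    rw [show PySem.List.pyGetD arr ((k : Nat) : Int) [] = arr.getD k [] from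
        PySem.List.pyGetD_natCast arr k []]
    rw [List.getD_eq_getElem arr [] hk]
    rw [PySem.List.pyGetD_of_nonneg _ _ hi.1, PySem.List.pyGetD_of_nonneg _ _ hi.1]
    rw [List.getD_eq_getElem _ 0 (by simp; omega), List.getD_eq_getElem _ 0 (by omega)]
    exact List.getElem_take

theorem word_position_spec : Claim_equal_word_position := by
  intro arr word _ hpre
  unfold Pre_word_position at hpre
  show word_position arr word = word_position_alt arr word
  simp only [word_position, word_position_alt]
  -- A side: per-i inner loop = finishB of row i plus finishB of column i
  have hfun : (fun (result : Int) (i : Int) =>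
      ((PySem.List.pyRange 0 (arr.length : Int) 1).foldl
        (fun (s : Int × Int × Int) j =>
          let t := rowStepA word (arr.length : Int) (s.1, s.2.1)
                     (PySem.List.pyGetD (PySem.List.pyGetD arr i []) j 0) j
          let u := colStepA word (arr.length : Int) (t.1, s.2.2)
                     (PySem.List.pyGetD (PySem.List.pyGetD arr j []) i 0) j
          (u.1, t.2, u.2))
        (result, 0, 0)).1)
      = (fun (result : Int) (i : Int) =>
          result + ((finishB word (rowVals arr i) (0, 0)).1 + (finishB word (colVals arr i) (0, 0)).1)) := by
    funext res i
    exact inner_eq arr word i res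
  rw [hfun]
  rw [PySem.List.foldl_add _ _ 0]
  -- B side: rows/cols are the rowVals/colVals lines, countAlt is finishB
  rw [cols_eq arr hpre, grid_eq arr hpre]
  have hcnt : ∀ line : List Int, countAlt line word = (finishB word line (0, 0)).1 :=
    fun line => countAlt_eq_finishB word line.length line le_rfl
  simp only [List.map_append, List.map_map, Function.comp_def, hcnt]
  rw [List.foldl_append]
  rw [show ∀ (l : List Int) (a : Int), l.foldl (· + ·) a = a + l.sum from by
    intro l; induction l with
    | nil => simp
    | cons x t ih => intro a; simp [List.foldl_cons, ih]; ring]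
  rw [show ∀ (l : List Int) (a : Int), l.foldl (· + ·) a = a + l.sum from by
    intro l; induction l with
    | nil => simp
    | cons x t ih => intro a; simp [List.foldl_cons, ih]; ring]
  rw [PySem.List.sum_map_add_int]
  ring
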